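-- pv_equiv track=rewrite | github.com/maniospas/pySynthesis | analysis.py | get_terms
-- ===== SOURCE A (Python) =====
-- def _is_valid_variable(text):
--     if len(text)==0:
--         return False
--     for c in text:
--         if _is_not_var_symbol(c):
--             return False
--     return True
--
-- def _get_asignment_pos(text):
--     level = 0
--     for pos, c in enumerate(text):
--         if _is_left_parenthesis_symbol(c):
--             level += 1
--         if _is_right_parenthesis_symbol(c):
--             level -= 1
--         if level==0 and c=="=" and pos>0 and not _is_math_symbol(text[pos-1]) and pos<len(text)-1 and text[pos+1]!="=":
--             return pos
--     return -1
--
-- def _is_math_symbol(text):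
--     valid_symbols = "<>=!"
--     if text in valid_symbols:
--         return True
--     return False
--
-- def _is_not_var_symbol(text):
--     valid_symbols = ".,!@#$%^/&*()-+={}[]:\t=<> "
--     if text in valid_symbols:
--         return True
--     return False
--
-- def _is_left_parenthesis_symbol(text):
--     parenthesis_symbols = "({[\"'"
--     if text in parenthesis_symbols:
--         return True
--     return False
--
-- def _is_right_parenthesis_symbol(text):
--     parenthesis_symbols = ")}]\"'"
--     if text in parenthesis_symbols:
--         return True
--     return False
--
-- equality_predicate = " <--> "
--
-- def get_terms(expressions):
--     terms = list()
--     for expression in expressions: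
--         if equality_predicate in expression:
--             expression = expression.split(equality_predicate)[1]
--         else:
--             assignment_pos = _get_asignment_pos(expression)
--             if assignment_pos!=-1:
--                 expression = expression[assignment_pos:]
--         current_var = ""
--         for c in expression+" ":
--             if _is_not_var_symbol(c):
--                 if _is_valid_variable(current_var) and not current_var.startswith("___"):
--                     terms.append(current_var)
--                 current_var = ""
--             else:
--                 current_var += c
--     return terms
-- ===== SOURCE B (Python) =====
-- equality_predicate = " <--> "
--
-- _DELIMS = ".,!@#$%^/&*()-+={}[]:\t=<> "
--
--
-- def _assignment_pos(text):
--     # same scan as A's, but carrying the previous character and the remaining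
--     # suffix instead of indexing into the string
--     level = 0
--     prev = ""
--     pos = 0
--     rest = text
--     while rest:
--         c, rest = rest[0], rest[1:]
--         if c in "({[\"'":
--             level += 1
--         if c in ")}]\"'":
--             level -= 1
--         if level == 0 and c == "=" and prev and prev not in "<>=!" \
--                 and rest and rest[0] != "=":
--             return pos
--         prev = c
--         pos += 1
--     return -1
--
--
-- def _core(expression):
--     if equality_predicate in expression:
--         return expression.split(equality_predicate)[1]
--     pos = _assignment_pos(expression)
--     return expression[pos:] if pos != -1 else expression
--
--
-- def _tokens(s):
--     # two-pointer span scan: skip delimiters, then slice out a maximal run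
--     toks = []
--     i, n = 0, len(s)
--     while i < n:
--         if s[i] in _DELIMS:
--             i += 1
--             continue
--         j = i
--         while j < n and s[j] not in _DELIMS:
--             j += 1
--         toks.append(s[i:j])
--         i = j
--     return toks
--
--
-- def get_terms(expressions):
--     return [t for e in expressions
--             for t in _tokens(_core(e))
--             if not t.startswith("___")]
-- ===== Notes on version B (the rewrite author's own statement) =====
-- stated objective: alternative
-- what changed: Replaces A's single char-by-char accumulator loop (with its trailing-space flush) by a two-pointer span tokenizer that slices out maximal runs of non-delimiter characters, and rewrites the assignment-position scan to carry the previous character and the remaining suffix instead of indexing into the string; results are collected by one comprehension instead of an appended list.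
import Mathlib
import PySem

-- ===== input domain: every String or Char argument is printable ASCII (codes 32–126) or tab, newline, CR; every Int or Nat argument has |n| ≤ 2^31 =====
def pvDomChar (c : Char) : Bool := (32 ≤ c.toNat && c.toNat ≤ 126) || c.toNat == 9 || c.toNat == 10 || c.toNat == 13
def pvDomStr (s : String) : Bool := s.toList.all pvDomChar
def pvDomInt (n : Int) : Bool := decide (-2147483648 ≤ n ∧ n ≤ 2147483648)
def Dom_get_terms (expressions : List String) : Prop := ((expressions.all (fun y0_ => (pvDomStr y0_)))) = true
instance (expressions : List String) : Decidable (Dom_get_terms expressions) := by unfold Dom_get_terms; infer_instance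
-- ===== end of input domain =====

-- B replaces A's char-by-char accumulator loop (with its trailing-space flush) by a
-- two-pointer span tokenizer, and rewrites the assignment scan to carry the previous
-- character instead of indexing; objective: alternative (same cost, different traversal).

-- ===== PORT A =====
-- single-char membership `c in "…"` ported as list membership (exact for one-char arguments,
-- the only way A calls these helpers)
def pvIsMath (c : Char) : Bool := "<>=!".toList.contains c

def pvNotVar (c : Char) : Bool := ".,!@#$%^/&*()-+={}[]:\t=<> ".toList.contains c

def pvLeftPar (c : Char) : Bool := "({[\"'".toList.contains c

def pvRightPar (c : Char) : Bool := ")}]\"'".toList.contains c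

def pvValidVar (cs : List Char) : Bool :=
  if cs.length = 0 then false else cs.all (fun c => !pvNotVar c)

-- _get_asignment_pos: fold over enumerate(text) keeping the nesting level
def pvAgnGo (full : List Char) : List (Int × Char) → Int → Int
  | [], _ => -1
  | (pos, c) :: rest, level =>
      let level := if pvLeftPar c then level + 1 else level
      let level := if pvRightPar c then level - 1 else level
      if level == 0 && c == '=' && decide (0 < pos)
          && !pvIsMath (PySem.List.pyGetD full (pos - 1) ' ')
          && decide (pos < PySem.List.len full - 1)
          && (PySem.List.pyGetD full (pos + 1) ' ' != '=')
      then pos else pvAgnGo full rest level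

def pvAgnPos (cs : List Char) : Int := pvAgnGo cs (PySem.List.enumerate cs) 0

def pvEqPred : List Char := " <--> ".toList

-- per-expression preprocessing: split(" <--> ")[1] if present, else trim at assignment pos
def pvPre (cs : List Char) : List Char :=
  if PySem.Chars.isIn pvEqPred cs then (PySem.Chars.splitOn cs pvEqPred).getD 1 []
  else
    let p := pvAgnPos cs
    if p ≠ -1 then cs.drop p.toNat else cs

-- A's inner loop: state = (terms so far, current_var), one char at a time
def pvALoop : List (List Char) → List Char → List Char → List (List Char)
  | terms, _, [] => terms
  | terms, cur, c :: rest =>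
      if pvNotVar c then
        pvALoop
          (if pvValidVar cur && !PySem.Chars.startswith cur "___".toList
           then terms ++ [cur] else terms) [] rest
      else pvALoop terms (cur ++ [c]) rest

def get_terms (expressions : List String) : List String :=
  (expressions.foldl (fun terms e => pvALoop terms [] (pvPre e.toList ++ [' '])) []).map
    String.ofList

-- ===== PORT B =====
-- B's membership tests are written as direct case analyses on the character
def pvBDelim : Char → Bool
  | '.' => true | ',' => true | '!' => true | '@' => true | '#' => true | '$' => true
  | '%' => true | '^' => true | '/' => true | '&' => true | '*' => true | '(' => true
  | ')' => true | '-' => true | '+' => true | '=' => true | '{' => true | '}' => true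
  | '[' => true | ']' => true | ':' => true | '\t' => true | '<' => true | '>' => true
  | ' ' => true | _ => false

def pvBMath : Char → Bool
  | '<' => true | '>' => true | '=' => true | '!' => true | _ => false

def pvBLeft : Char → Bool
  | '(' => true | '{' => true | '[' => true | '"' => true | '\'' => true | _ => false

def pvBRight : Char → Bool
  | ')' => true | '}' => true | ']' => true | '"' => true | '\'' => true | _ => false

-- _assignment_pos: while-loop over the suffix, carrying prev char, position and level
def pvBAsgGo : Option Char → Int → Int → List Char → Int
  | _, _, _, [] => -1
  | prev, pos, level, c :: rest =>
      let level := if pvBLeft c then level + 1 else level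
      let level := if pvBRight c then level - 1 else level
      if level == 0 && c == '=' && prev.any (fun p => !pvBMath p)
          && rest.head?.any (fun r => r != '=')
      then pos
      else pvBAsgGo (some c) (pos + 1) level rest

def pvBAsg (cs : List Char) : Int := pvBAsgGo none 0 0 cs

def pvBEqPred : List Char := " <--> ".toList

def pvBCore (cs : List Char) : List Char :=
  if PySem.Chars.isIn pvBEqPred cs then (PySem.Chars.splitOn cs pvBEqPred).getD 1 []
  else
    let p := pvBAsg cs
    if p ≠ -1 then cs.drop p.toNat else cs

-- _tokens: skip a delimiter, else slice out the maximal non-delimiter run (two pointers)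
def pvBTok : List Char → List (List Char)
  | [] => []
  | c :: rest =>
      if pvBDelim c then pvBTok rest
      else (c :: rest.takeWhile (fun x => !pvBDelim x)) ::
             pvBTok (rest.dropWhile (fun x => !pvBDelim x))
termination_by l => l.length
decreasing_by
  · simp
  · exact Nat.lt_succ_of_le (List.length_dropWhile_le _ _)

def get_terms_alt (expressions : List String) : List String :=
  (expressions.flatMap (fun e =>
      (pvBTok (pvBCore e.toList)).filter
        (fun t => !PySem.Chars.startswith t "___".toList))).map String.ofList

-- ===== PRECONDITION & SPEC =====
def Spec_get_terms (expressions : List String) (out : List String) : Prop := out = get_terms_alt expressions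
instance (expressions : List String) (out : List String) : Decidable (Spec_get_terms expressions out) := by unfold Spec_get_terms; infer_instance

-- ===== CLAIM (what is proved, stated in full; the proofs are below) =====
def Claim_equal_get_terms : Prop := ∀ (expressions : List String), Dom_get_terms expressions → Spec_get_terms expressions (get_terms expressions)

-- ===== LEMMAS AND PROOFS =====

-- the four character classes agree
theorem pvBDelim_eq (c : Char) : pvBDelim c = pvNotVar c := by
  rw [pvBDelim.eq_def]; split <;> simp_all [pvNotVar]

theorem pvBMath_eq (c : Char) : pvBMath c = pvIsMath c := by
  rw [pvBMath.eq_def]; split <;> simp_all [pvIsMath]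

theorem pvBLeft_eq (c : Char) : pvBLeft c = pvLeftPar c := by
  rw [pvBLeft.eq_def]; split <;> simp_all [pvLeftPar]

theorem pvBRight_eq (c : Char) : pvBRight c = pvRightPar c := by
  rw [pvBRight.eq_def]; split <;> simp_all [pvRightPar]

-- "pos>0 and text[pos-1] is no math symbol" read off the prefix before the position
theorem prev_cond_eq (pre : List Char) (tail : List Char) :
    (decide (0 < (pre.length : Int))
      && !pvIsMath (PySem.List.pyGetD (pre ++ tail) ((pre.length : Int) - 1) ' '))
      = pre.getLast?.any (fun p => !pvBMath p) := by
  rcases List.eq_nil_or_concat pre with rfl | ⟨ys, y, rfl⟩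
  · simp
  · simp only [List.concat_eq_append]
    have h1 : ((ys ++ [y]).length : Int) - 1 = ((ys.length : Nat) : Int) := by simp
    rw [h1, PySem.List.pyGetD_natCast]
    have h2 : ((ys ++ [y]) ++ tail).getD ys.length ' ' = y := by
      simp [List.getD_eq_getElem?_getD]
    rw [h2]
    simp [pvBMath_eq]

-- "pos<len-1 and text[pos+1]!='='" read off the remaining suffix
theorem next_cond_eq (pre : List Char) (c : Char) (rest : List Char) :
    (decide ((pre.length : Int) < PySem.List.len (pre ++ c :: rest) - 1)
      && (PySem.List.pyGetD (pre ++ c :: rest) ((pre.length : Int) + 1) ' ' != '='))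
      = rest.head?.any (fun r => r != '=') := by
  cases rest with
  | nil => simp [PySem.List.len_eq]
  | cons r rs =>
      have h0 : ((pre.length : Int) + 1) = ((pre.length + 1 : Nat) : Int) := by push_cast; ring
      rw [h0, PySem.List.pyGetD_natCast]
      have h1 : (pre ++ c :: r :: rs).getD (pre.length + 1) ' ' = r := by
        simp [List.getD_eq_getElem?_getD]
      rw [h1]
      simp [PySem.List.len_eq]
      omega

-- the two assignment scans agree (B carries prev/suffix where A indexes)
theorem asg_go_eq : ∀ (suffix pre : List Char) (level : Int),
    pvAgnGo (pre ++ suffix) (PySem.List.enumerate suffix pre.length) level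
      = pvBAsgGo pre.getLast? (pre.length : Int) level suffix := by
  intro suffix
  induction suffix with
  | nil => intro pre level; simp [pvAgnGo, pvBAsgGo, PySem.List.enumerate_nil]
  | cons c rest ih =>
      intro pre level
      rw [PySem.List.enumerate_cons]
      simp only [pvAgnGo, pvBAsgGo, pvBLeft_eq, pvBRight_eq]
      rw [Bool.and_assoc, Bool.and_assoc, Bool.and_assoc,
        ← Bool.and_assoc (decide (0 < (pre.length : Int))),
        prev_cond_eq pre (c :: rest), next_cond_eq pre c rest]
      have hrec : pvAgnGo (pre ++ c :: rest) (PySem.List.enumerate rest ((pre.length : Int) + 1))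
          (if pvRightPar c then (if pvLeftPar c then level + 1 else level) - 1
           else if pvLeftPar c then level + 1 else level)
          = pvBAsgGo (some c) ((pre.length : Int) + 1)
            (if pvRightPar c then (if pvLeftPar c then level + 1 else level) - 1
             else if pvLeftPar c then level + 1 else level) rest := by
        have := ih (pre ++ [c])
          (if pvRightPar c then (if pvLeftPar c then level + 1 else level) - 1
           else if pvLeftPar c then level + 1 else level)
        simpa [List.getLast?_concat] using this
      rw [hrec]
      simp [Bool.and_assoc]

theorem asg_eq (cs : List Char) : pvBAsg cs = pvAgnPos cs := by
  have := asg_go_eq cs [] 0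
  simpa [pvAgnPos, pvBAsg] using this.symm

theorem core_eq (cs : List Char) : pvBCore cs = pvPre cs := by
  simp [pvBCore, pvPre, pvBEqPred, pvEqPred, asg_eq]

-- flushing A's accumulator appends exactly the filtered token
theorem flush_eq (terms : List (List Char)) (cur : List Char)
    (h : ∀ c ∈ cur, pvNotVar c = false) :
    (if pvValidVar cur && !PySem.Chars.startswith cur "___".toList
     then terms ++ [cur] else terms)
      = terms ++ (if cur ≠ [] && !PySem.Chars.startswith cur "___".toList then [cur] else []) := by
  cases cur with
  | nil => simp [pvValidVar]
  | cons c cs =>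
      have hv : pvValidVar (c :: cs) = true := by
        simp [pvValidVar]
        exact ⟨h c (by simp), fun x hx => h x (by simp [hx])⟩
      simp [hv]
      split_ifs <;> simp_all

-- B's tokenizer with a pending (delimiter-free) run prepended
def pvRun (cur cs : List Char) : List (List Char) :=
  match cur with
  | [] => pvBTok cs
  | _ :: _ =>
      (cur ++ cs.takeWhile (fun x => !pvBDelim x)) ::
        pvBTok (cs.dropWhile (fun x => !pvBDelim x))

theorem aLoop_delim (terms : List (List Char)) (cur : List Char) (c : Char)
    (rest : List Char) (hd : pvNotVar c = true) :
    pvALoop terms cur (c :: rest) =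
      pvALoop (if pvValidVar cur && !PySem.Chars.startswith cur "___".toList
               then terms ++ [cur] else terms) [] rest := by
  simp [pvALoop, hd]

theorem aLoop_var (terms : List (List Char)) (cur : List Char) (c : Char)
    (rest : List Char) (hd : pvNotVar c = false) :
    pvALoop terms cur (c :: rest) = pvALoop terms (cur ++ [c]) rest := by
  simp [pvALoop, hd]

-- extending the pending run by a non-delimiter character
theorem pvRun_var (cur : List Char) (c : Char) (cs : List Char)
    (hd : pvBDelim c = false) : pvRun cur (c :: cs) = pvRun (cur ++ [c]) cs := by
  cases cur with
  | nil => simp [pvRun, pvBTok, hd]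
  | cons x xs => simp [pvRun, hd]

-- a delimiter closes the pending run
theorem pvRun_delim (cur : List Char) (c : Char) (cs : List Char)
    (hd : pvBDelim c = true) :
    pvRun cur (c :: cs) = (match cur with | [] => [] | _ :: _ => [cur]) ++ pvBTok cs := by
  cases cur with
  | nil => simp [pvRun, pvBTok, hd]
  | cons x xs => simp [pvRun, pvBTok, hd]

theorem aLoop_tok : ∀ (cs : List Char) (terms : List (List Char)) (cur : List Char),
    (∀ c ∈ cur, pvNotVar c = false) →
    pvALoop terms cur (cs ++ [' ']) =
      terms ++ (pvRun cur cs).filter (fun t => !PySem.Chars.startswith t "___".toList) := by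
  intro cs
  induction cs with
  | nil =>
      intro terms cur h
      rw [List.nil_append, aLoop_delim _ _ _ _ (by decide), flush_eq terms cur h]
      cases cur with
      | nil => simp [pvALoop, pvRun, pvBTok]
      | cons x xs =>
          simp only [pvALoop, pvRun, List.takeWhile_nil, List.dropWhile_nil, pvBTok,
            List.append_nil, List.filter]
          split_ifs <;> simp_all
  | cons c cs ih =>
      intro terms cur h
      by_cases hd : pvNotVar c = true
      · rw [List.cons_append, aLoop_delim _ _ _ _ hd, ih _ [] (by simp),
          flush_eq terms cur h, pvRun_delim cur c cs (by rw [pvBDelim_eq, hd])]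
        cases cur with
        | nil => simp [pvRun]
        | cons x xs =>
            simp only [pvRun, List.filter_append, List.filter, List.append_assoc]
            split_ifs <;> simp_all
      · have hd' : pvNotVar c = false := by simpa using hd
        rw [List.cons_append, aLoop_var _ _ _ _ hd',
          ih terms (cur ++ [c]) (by
            intro x hx
            rcases List.mem_append.mp hx with hx | hx
            · exact h x hx
            · simp at hx; subst hx; exact hd'),
          pvRun_var cur c cs (by rw [pvBDelim_eq, hd'])]

theorem fold_eq : ∀ (exprs : List String) (terms : List (List Char)),
    exprs.foldl (fun t e => pvALoop t [] (pvPre e.toList ++ [' '])) terms =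
      terms ++ exprs.flatMap (fun e =>
        (pvBTok (pvBCore e.toList)).filter
          (fun t => !PySem.Chars.startswith t "___".toList)) := by
  intro exprs
  induction exprs with
  | nil => intro terms; simp
  | cons e es ih =>
      intro terms
      simp only [List.foldl_cons]
      rw [aLoop_tok (pvPre e.toList) terms [] (by simp), ih]
      simp [pvRun, core_eq, List.append_assoc]

-- ===== VERDICT (by name: the statement is the Claim_ definition above) =====
theorem get_terms_spec : Claim_equal_get_terms := by
  intro expressions _
  unfold Spec_get_terms get_terms get_terms_alt
  rw [fold_eq expressions []]
  simp
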